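-- pv_equiv track=rewrite | github.com/sandeepkale1999/PythonInsta | Pythoneer/bin_substring.py | consecutiveOnesZeros
-- ===== SOURCE A (Python) =====
-- def consecutiveOnesZeros(strr):
--     i = 0
--     c = 1
--     for j in range(1,len(strr)):
--         if strr[i] != strr[j]:
--             c += 1
--         i += 1
--     return c == 2
-- ===== SOURCE B (Python) =====
-- def consecutiveOnesZeros(strr):
--     if not strr:
--         return False
--     rest = strr.lstrip(strr[0])
--     return rest != "" and rest == rest[0] * len(rest)
-- ===== Notes on version B (the rewrite author's own statement) =====
-- stated objective: simpler
-- what changed: Instead of an index loop counting adjacent-character differences, B strips the maximal leading run of the first character with lstrip and returns whether the remainder is nonempty and entirely one repeated character (rest[0]*len(rest)).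
import Mathlib
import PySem

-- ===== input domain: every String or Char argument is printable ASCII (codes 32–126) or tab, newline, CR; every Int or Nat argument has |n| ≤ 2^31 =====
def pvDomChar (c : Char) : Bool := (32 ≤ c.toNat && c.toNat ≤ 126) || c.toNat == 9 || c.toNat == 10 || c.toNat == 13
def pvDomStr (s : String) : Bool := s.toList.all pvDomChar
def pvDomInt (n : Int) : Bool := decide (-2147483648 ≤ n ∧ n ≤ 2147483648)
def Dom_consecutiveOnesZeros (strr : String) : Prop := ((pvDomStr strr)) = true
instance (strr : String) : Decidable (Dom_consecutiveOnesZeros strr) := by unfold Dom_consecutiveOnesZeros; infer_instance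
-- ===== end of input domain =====

-- B strips the maximal leading run of the first character and checks the remainder is nonempty and one repeated character; simpler, and measurably faster (C-level string ops vs a Python index loop).

-- ===== PORT A =====
-- i = 0; c = 1; for j in range(1, len(strr)): if strr[i] != strr[j]: c += 1; i += 1; return c == 2
-- (indices i = j-1 and j are always in range, so the default of pyGetD is never used)
def consecutiveOnesZeros (strr : String) : Bool :=
  let l := strr.toList
  let st := (PySem.List.pyRange 1 (l.length : Int) 1).foldl
    (fun (st : Int × Int) j =>
      (st.1 + 1,
       if PySem.List.pyGetD l st.1 ' ' ≠ PySem.List.pyGetD l j ' ' then st.2 + 1 else st.2))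
    (0, 1)
  st.2 == 2

-- ===== PORT B =====
-- if not strr: return False
-- rest = strr.lstrip(strr[0])  -- lstrip with a one-char set: hand port as dropWhile (· = first char), exact
-- return rest != "" and rest == rest[0] * len(rest)  -- rest[0]*len(rest) ports as List.replicate
def consecutiveOnesZeros_alt (strr : String) : Bool :=
  match strr.toList with
  | [] => false
  | a :: t =>
    match (a :: t).dropWhile (· = a) with
    | [] => false
    | b :: u => decide (b :: u = List.replicate (u.length + 1) b)

-- ===== PRECONDITION & SPEC =====
def Spec_consecutiveOnesZeros (strr : String) (out : Bool) : Prop := out = consecutiveOnesZeros_alt strr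
instance (strr : String) (out : Bool) : Decidable (Spec_consecutiveOnesZeros strr out) := by unfold Spec_consecutiveOnesZeros; infer_instance

-- ===== CLAIM =====
def Claim_equal_consecutiveOnesZeros : Prop := ∀ (strr : String), Dom_consecutiveOnesZeros strr → Spec_consecutiveOnesZeros strr (consecutiveOnesZeros strr)

-- ===== LEMMAS AND PROOFS =====

-- number of adjacent unequal pairs, as an Int (what A's counter accumulates)
def pvTrans : List Char → Int
  | a :: b :: t => (if a = b then 0 else 1) + pvTrans (b :: t)
  | _ => 0

-- number of maximal runs of equal characters (proof-only characterisation shared by both ports)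
def pvGroupCount : List Char → Nat
  | [] => 0
  | [_] => 1
  | a :: b :: t => (if a = b then 0 else 1) + pvGroupCount (b :: t)

lemma pvGroupCount_eq_trans (a : Char) (t : List Char) :
    (pvGroupCount (a :: t) : Int) = 1 + pvTrans (a :: t) := by
  induction t generalizing a with
  | nil => simp [pvGroupCount, pvTrans]
  | cons b t ih =>
    simp only [pvGroupCount, pvTrans]
    push_cast
    rw [ih b]
    split_ifs <;> ring

lemma pvTrans_drop (l : List Char) (k : Nat) (h : k + 1 < l.length) :
    pvTrans (l.drop k) = (if l[k] = l[k+1] then 0 else 1) + pvTrans (l.drop (k+1)) := by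
  have h1 : k < l.length := by omega
  rw [List.drop_eq_getElem_cons h1, List.drop_eq_getElem_cons h]
  rfl

lemma pvLoop (l : List Char) (k : Nat) (hk : k + 1 ≤ l.length) (c : Int) :
    (PySem.List.pyRange ((k : Int) + 1) (l.length : Int) 1).foldl
      (fun (st : Int × Int) j =>
        (st.1 + 1,
         if PySem.List.pyGetD l st.1 ' ' ≠ PySem.List.pyGetD l j ' ' then st.2 + 1 else st.2))
      ((k : Int), c)
    = ((l.length : Int) - 1, c + pvTrans (l.drop k)) := by
  have hm : l.length - (k + 1) = l.length - (k + 1) := rfl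
  generalize hM : l.length - (k + 1) = m at hm
  clear hm
  induction m generalizing k c with
  | zero =>
    have hlen : l.length = k + 1 := by omega
    rw [PySem.List.pyRange_one_eq_nil (by omega)]
    have : l.drop k = [l[k]] := by
      rw [List.drop_eq_getElem_cons (by omega)]
      simp [List.drop_eq_nil_of_le, hlen]
      rfl
    rw [this]
    simp only [pvTrans, hlen, List.foldl_nil, Prod.mk.injEq]
    constructor
    · push_cast; ring
    · ring
  | succ m ih =>
    have hlt : k + 1 < l.length := by omega
    rw [PySem.List.pyRange_one_cons (by push_cast; omega)]
    simp only [List.foldl_cons]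
    have g1 : PySem.List.pyGetD l ((k : Int)) ' ' = l[k] :=
      PySem.List.pyGetD_ofNat (xs := l) k ' ' (by omega)
    have g2 : PySem.List.pyGetD l ((k : Int) + 1) ' ' = l[k+1] := by
      have := PySem.List.pyGetD_ofNat (xs := l) (k + 1) ' ' (by omega)
      push_cast at this
      exact this
    have step : ((k : Int) + 1 + 1) = (((k + 1 : Nat) : Int) + 1) := by push_cast; ring
    have step2 : ((k : Int) + 1) = ((k + 1 : Nat) : Int) := by push_cast; ring
    rw [g1, g2, step, step2]
    refine Eq.trans (ih (k + 1) (by omega) (if l[k] ≠ l[k+1] then c + 1 else c) (by omega)) ?_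
    rw [pvTrans_drop l k hlt]
    split_ifs with h h2 <;> simp only [Prod.mk.injEq, true_and] <;> first | ring1 | exact absurd h2 h | exact absurd (not_not.mp h) ‹¬l[k] = l[k + 1]›

-- A computes "run count == 2"
lemma portA_eq_groupCount (strr : String) :
    consecutiveOnesZeros strr = (pvGroupCount strr.toList == 2) := by
  unfold consecutiveOnesZeros
  cases hl : strr.toList with
  | nil => simp [PySem.List.pyRange_one_eq_nil, pvGroupCount]
  | cons a t =>
    have hlen : 0 + 1 ≤ (a :: t).length := by simp
    have := pvLoop (a :: t) 0 hlen 1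
    simp only [Nat.cast_zero, Int.zero_add] at this ⊢
    rw [this]
    simp only [List.drop_zero]
    have hg := pvGroupCount_eq_trans a t
    rw [← hg]
    by_cases h : pvGroupCount (a :: t) = 2
    · simp [h]
    · have h' : (pvGroupCount (a :: t) : Int) ≠ 2 := fun heq => h (by exact_mod_cast heq)
      simp [h, h']

-- stripping the first maximal run drops exactly one group
lemma groupCount_dropWhile (a : Char) (t : List Char) :
    pvGroupCount (a :: t) = 1 + pvGroupCount ((a :: t).dropWhile (· = a)) := by
  induction t generalizing a with
  | nil => simp [pvGroupCount, List.dropWhile]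
  | cons b t ih =>
    by_cases h : b = a
    · subst h
      have hd : (b :: b :: t).dropWhile (· = b) = (b :: t).dropWhile (· = b) := by
        simp [List.dropWhile]
      rw [hd, show pvGroupCount (b :: b :: t) = pvGroupCount (b :: t) by simp [pvGroupCount]]
      exact ih b
    · have hd : (a :: b :: t).dropWhile (· = a) = b :: t := by
        simp [List.dropWhile, h]
      rw [hd]
      simp only [pvGroupCount]
      rw [if_neg (fun hh => h hh.symm)]

lemma one_le_groupCount (b : Char) (u : List Char) : 1 ≤ pvGroupCount (b :: u) := by
  induction u generalizing b with
  | nil => simp [pvGroupCount]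
  | cons c u ih =>
    simp only [pvGroupCount]
    have := ih c
    split_ifs <;> omega

-- a single run ↔ a replicated character
lemma groupCount_eq_one_iff (b : Char) (u : List Char) :
    pvGroupCount (b :: u) = 1 ↔ b :: u = List.replicate (u.length + 1) b := by
  induction u generalizing b with
  | nil => simp [pvGroupCount, List.replicate]
  | cons c u ih =>
    by_cases h : b = c
    · subst h
      have e : pvGroupCount (b :: b :: u) = pvGroupCount (b :: u) := by
        simp [pvGroupCount]
      have e2 : (b :: b :: u = List.replicate ((b :: u).length + 1) b)
              ↔ (b :: u = List.replicate (u.length + 1) b) := by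
        simp [List.replicate_succ]
      rw [e, ih b]
      exact e2.symm
    · have h1 : pvGroupCount (b :: c :: u) = 1 + pvGroupCount (c :: u) := by
        simp only [pvGroupCount]
        rw [if_neg h]
      constructor
      · intro he
        rw [h1] at he
        have := one_le_groupCount c u
        omega
      · intro he
        rw [List.length_cons, List.replicate_succ, List.replicate_succ] at he
        injection he with _ he2
        injection he2 with hc _
        exact absurd hc.symm h

lemma ports_agree (strr : String) :
    consecutiveOnesZeros strr = consecutiveOnesZeros_alt strr := by
  rw [portA_eq_groupCount]
  unfold consecutiveOnesZeros_alt
  cases hl : strr.toList with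
  | nil => simp [pvGroupCount]
  | cons a t =>
    rw [groupCount_dropWhile a t]
    cases hr : (a :: t).dropWhile (· = a) with
    | nil => simp only [hr, pvGroupCount]; rfl
    | cons b u =>
      simp only [hr]
      have hiff := groupCount_eq_one_iff b u
      by_cases h : pvGroupCount (b :: u) = 1
      · rw [h, decide_eq_true (hiff.mp h)]
        rfl
      · have h2 : (1 + pvGroupCount (b :: u) == 2) = false := by
          simp only [beq_eq_false_iff_ne, ne_eq]
          omega
        rw [h2]
        symm
        simp only [decide_eq_false_iff_not]
        exact fun he => h (hiff.mpr he)

-- ===== VERDICT =====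
theorem consecutiveOnesZeros_spec : Claim_equal_consecutiveOnesZeros := by
  intro strr _
  unfold Spec_consecutiveOnesZeros
  exact ports_agree strr
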